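-- pv_equiv track=rewrite | github.com/Zalayetha/Rest-API-NLP-Ruled-Based-and-Statistic-Based- | INER/rule_based.py | classify_contextual_features
-- ===== SOURCE A (Python) =====
-- def classify_contextual_features(tokens, features):
--   classified_contextual_features = []
--   for token in tokens:
--     found = False
--     for feature, values in features.items():
--       if token[0] in values:
--         classified_contextual_features.append((token[0],token[1],feature))
--         found = True
--     if not found:
--       classified_contextual_features.append((token[0],token[1],""))
--   return classified_contextual_features
-- ===== SOURCE B (Python) =====
-- def classify_contextual_features(tokens, features):
--     # Invert the features dict once: value -> ordered list of features containing it,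
--     # then a single dict lookup per token.
--     index = {}
--     for feature, values in features.items():
--         for v in dict.fromkeys(values):
--             index.setdefault(v, []).append(feature)
--     out = []
--     for word, tag in tokens:
--         fs = index.get(word, [])
--         if fs:
--             for f in fs:
--                 out.append((word, tag, f))
--         else:
--             out.append((word, tag, ""))
--     return out
-- ===== Notes on version B (the rewrite author's own statement) =====
-- stated objective: faster
-- what changed: Instead of scanning every feature's value list for every token, B inverts the features dict once into a value->ordered-feature-list index and answers each token with a single dict lookup.
import Mathlib
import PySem

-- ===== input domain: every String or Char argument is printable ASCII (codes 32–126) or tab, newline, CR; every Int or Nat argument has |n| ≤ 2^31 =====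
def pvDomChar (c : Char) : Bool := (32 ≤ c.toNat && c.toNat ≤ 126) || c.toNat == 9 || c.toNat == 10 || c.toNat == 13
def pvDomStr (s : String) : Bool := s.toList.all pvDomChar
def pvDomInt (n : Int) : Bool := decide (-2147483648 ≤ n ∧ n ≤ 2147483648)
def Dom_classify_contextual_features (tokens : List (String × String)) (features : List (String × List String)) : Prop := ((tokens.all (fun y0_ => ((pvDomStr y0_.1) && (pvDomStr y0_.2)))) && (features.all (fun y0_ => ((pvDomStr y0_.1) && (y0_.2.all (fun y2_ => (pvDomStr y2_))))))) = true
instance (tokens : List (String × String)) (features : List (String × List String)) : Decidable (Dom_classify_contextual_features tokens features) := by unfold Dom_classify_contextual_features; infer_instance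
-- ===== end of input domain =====

-- B replaces A's per-token scan of every feature's value list by a value→feature-list
-- index built once from the features dict, one lookup per token (objective: faster).

-- ===== PORT A =====
-- per token: fold over features.items() carrying (output so far, found)
def classify_contextual_features (tokens : List (String × String)) (features : List (String × List String)) : List (String × String × String) :=
  tokens.foldl (fun acc tk =>
    let p := features.foldl
      (fun (p : List (String × String × String) × Bool) fv =>
        if fv.2.contains tk.1 then (p.1 ++ [(tk.1, tk.2, fv.1)], true) else p)
      (acc, false)
    if p.2 then p.1 else p.1 ++ [(tk.1, tk.2, "")]) []

-- ===== PORT B =====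
-- index.setdefault(v, []).append(feature), with dict.fromkeys(values) = PySem.List.dedup
def pvBuildIndex (features : List (String × List String)) : PySem.Dict String (List String) :=
  features.foldl
    (fun idx fv =>
      (PySem.List.dedup fv.2).foldl (fun idx v => idx.insert v (idx.getD v [] ++ [fv.1])) idx)
    PySem.Dict.empty

def classify_contextual_features_alt (tokens : List (String × String)) (features : List (String × List String)) : List (String × String × String) :=
  let index := pvBuildIndex features
  tokens.foldl (fun out tk =>
    let fs := index.getD tk.1 []
    if fs.isEmpty then out ++ [(tk.1, tk.2, "")]
    else out ++ fs.map (fun f => (tk.1, tk.2, f))) []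

-- ===== PRECONDITION & SPEC =====
def Spec_classify_contextual_features (tokens : List (String × String)) (features : List (String × List String)) (out : List (String × String × String)) : Prop := out = classify_contextual_features_alt tokens features
instance (tokens : List (String × String)) (features : List (String × List String)) (out : List (String × String × String)) : Decidable (Spec_classify_contextual_features tokens features out) := by unfold Spec_classify_contextual_features; infer_instance

-- ===== CLAIM (what is proved, stated in full; the proofs are below) =====
def Claim_equal_classify_contextual_features : Prop := ∀ (tokens : List (String × String)) (features : List (String × List String)), Dom_classify_contextual_features tokens features → Spec_classify_contextual_features tokens features (classify_contextual_features tokens features)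

-- ===== LEMMAS AND PROOFS =====

/-- The ordered list of features whose value list contains `w`. -/
def pvMatchF : List (String × List String) → String → List String
  | [], _ => []
  | fv :: rest, w => (if fv.2.contains w then [fv.1] else []) ++ pvMatchF rest w

theorem pvInnerA (features : List (String × List String)) (w t : String) :
    ∀ (acc : List (String × String × String)) (b : Bool),
      features.foldl
        (fun (p : List (String × String × String) × Bool) fv =>
          if fv.2.contains w then (p.1 ++ [(w, t, fv.1)], true) else p)
        (acc, b)
      = (acc ++ (pvMatchF features w).map (fun f => (w, t, f)),
         b || !(pvMatchF features w).isEmpty) := by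
  induction features with
  | nil => intro acc b; simp [pvMatchF]
  | cons fv rest ih =>
    intro acc b
    rw [List.foldl_cons]
    by_cases h : fv.2.contains w = true
    · rw [if_pos h, ih]
      have h' : w ∈ fv.2 := by simpa using h
      simp [pvMatchF, h']
    · rw [if_neg h, ih]
      have h' : w ∉ fv.2 := by simpa using h
      simp [pvMatchF, h']

theorem pvInnerB (f : String) (w : String) (l : List String) (hnd : l.Nodup) :
    ∀ (idx : PySem.Dict String (List String)),
      (l.foldl (fun idx v => idx.insert v (idx.getD v [] ++ [f])) idx).getD w []
      = idx.getD w [] ++ (if l.contains w then [f] else []) := by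
  induction l with
  | nil => intro idx; simp
  | cons v rest ih =>
    intro idx
    have hv : v ∉ rest := (List.nodup_cons.mp hnd).1
    have hrest := (List.nodup_cons.mp hnd).2
    rw [List.foldl_cons, ih hrest]
    by_cases hw : w = v
    · subst hw
      simp [PySem.Dict.getD_insert_self, hv]
    · simp [PySem.Dict.getD_insert, hw]

theorem pvIndexEq (features : List (String × List String)) (w : String) :
    ∀ (idx : PySem.Dict String (List String)),
      (features.foldl
        (fun idx fv =>
          (PySem.List.dedup fv.2).foldl (fun idx v => idx.insert v (idx.getD v [] ++ [fv.1])) idx)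
        idx).getD w []
      = idx.getD w [] ++ pvMatchF features w := by
  induction features with
  | nil => intro idx; simp [pvMatchF]
  | cons fv rest ih =>
    intro idx
    have hnd : (PySem.List.dedup fv.2).Nodup := PySem.List.nodup_dedup fv.2
    have hm : (PySem.List.dedup fv.2).contains w = fv.2.contains w := by
      simp [List.contains_eq_mem]
    simp only [List.foldl_cons, ih, pvInnerB fv.1 w _ hnd, pvMatchF, hm]
    by_cases h : fv.2.contains w = true <;> simp

theorem pvGetDIndex (features : List (String × List String)) (w : String) :
    (pvBuildIndex features).getD w [] = pvMatchF features w := by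
  simpa using pvIndexEq features w PySem.Dict.empty

theorem pvStepEq (features : List (String × List String)) (acc : List (String × String × String)) (tk : String × String) :
    (let p := features.foldl
      (fun (p : List (String × String × String) × Bool) fv =>
        if fv.2.contains tk.1 then (p.1 ++ [(tk.1, tk.2, fv.1)], true) else p)
      (acc, false)
     if p.2 then p.1 else p.1 ++ [(tk.1, tk.2, "")])
    = (let fs := (pvBuildIndex features).getD tk.1 []
       if fs.isEmpty then acc ++ [(tk.1, tk.2, "")]
       else acc ++ fs.map (fun f => (tk.1, tk.2, f))) := by
  simp only [pvInnerA features tk.1 tk.2 acc false, pvGetDIndex, Bool.false_or]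
  cases h : (pvMatchF features tk.1).isEmpty <;> simp_all [List.isEmpty_iff]

theorem pvFoldlEq (features : List (String × List String)) (tokens : List (String × String)) :
    ∀ (acc : List (String × String × String)),
      tokens.foldl (fun acc tk =>
        let p := features.foldl
          (fun (p : List (String × String × String) × Bool) fv =>
            if fv.2.contains tk.1 then (p.1 ++ [(tk.1, tk.2, fv.1)], true) else p)
          (acc, false)
        if p.2 then p.1 else p.1 ++ [(tk.1, tk.2, "")]) acc
      = tokens.foldl (fun out tk =>
          let fs := (pvBuildIndex features).getD tk.1 []
          if fs.isEmpty then out ++ [(tk.1, tk.2, "")]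
          else out ++ fs.map (fun f => (tk.1, tk.2, f))) acc := by
  induction tokens with
  | nil => intro acc; rfl
  | cons tk rest ih =>
    intro acc
    rw [List.foldl_cons, List.foldl_cons, pvStepEq, ih]

-- ===== VERDICT (by name: the statement is the Claim_ definition above) =====
theorem classify_contextual_features_spec : Claim_equal_classify_contextual_features := by
  intro tokens features _
  unfold Spec_classify_contextual_features
  unfold classify_contextual_features classify_contextual_features_alt
  exact pvFoldlEq features tokens []
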